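-- pv_equiv track=rewrite | github.com/justt1n/gameflip_tool | core/orchestrator.py | _format_listing_labels
-- ===== SOURCE A (Python) =====
-- def _format_listing_labels(labels: list[str]) -> str:
--     counts: dict[str, int] = {}
--     for label in labels:
--         counts[label] = counts.get(label, 0) + 1
--
--     formatted = []
--     for label, count in counts.items():
--         entry = f"[{label}]"
--         if count > 1:
--             entry = f"{entry} x{count}"
--         formatted.append(entry)
--     return "; ".join(formatted)
-- ===== SOURCE B (Python) =====
-- def _format_listing_labels(labels: list[str]) -> str:
--     entries = []
--     remaining = list(labels)
--     while remaining:
--         head = remaining[0]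
--         rest = [x for x in remaining[1:] if x != head]
--         count = len(remaining) - len(rest)
--         entries.append(f"[{head}]" + (f" x{count}" if count > 1 else ""))
--         remaining = rest
--     return "; ".join(entries)
-- ===== Notes on version B (the rewrite author's own statement) =====
-- stated objective: alternative
-- what changed: Replaces A's counting-dict pass plus formatting loop by a partition loop: repeatedly take the first remaining label, filter out all its occurrences (the length drop gives its count), emit its entry, and continue on the filtered remainder; entries are joined at the end.
import Mathlib
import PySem

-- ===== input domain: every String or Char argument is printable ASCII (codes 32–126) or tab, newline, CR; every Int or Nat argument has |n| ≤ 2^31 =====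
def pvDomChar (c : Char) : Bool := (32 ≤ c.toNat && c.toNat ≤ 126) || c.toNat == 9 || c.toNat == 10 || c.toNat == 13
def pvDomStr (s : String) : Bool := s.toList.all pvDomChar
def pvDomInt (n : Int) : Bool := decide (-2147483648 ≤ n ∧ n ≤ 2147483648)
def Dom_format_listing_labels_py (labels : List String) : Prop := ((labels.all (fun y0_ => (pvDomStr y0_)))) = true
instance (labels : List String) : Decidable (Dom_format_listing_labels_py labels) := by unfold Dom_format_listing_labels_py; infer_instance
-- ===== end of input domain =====

-- B replaces A's counting-dict pass plus formatting loop by a partition loop: repeatedly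
-- take the first remaining label, filter out all its occurrences (the length drop gives its
-- count), emit its entry and continue on the remainder (alternative algorithm, not faster).

-- ===== PORT A =====
def format_listing_labels_py (labels : List String) : String :=
  let counts : PySem.Dict String Int :=
    labels.foldl (fun d label => d.insert label (d.getD label 0 + 1)) PySem.Dict.empty
  let formatted : List String :=
    counts.items.foldl (fun acc p =>
      let entry := "[" ++ p.1 ++ "]"
      let entry := if p.2 > 1 then entry ++ " x" ++ PySem.Int.toStr p.2 else entry
      acc ++ [entry]) []
  PySem.Str.join "; " formatted

-- ===== PORT B =====
-- the while loop: peel off the first label and all its occurrences, emit its entry, continue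
def pvAltEntries : List String → List String
  | [] => []
  | h :: t =>
    let rest := t.filter (fun x => !(x == h))
    let c : Int := (1 + t.length : Int) - rest.length
    ("[" ++ h ++ "]" ++ (if c > 1 then " x" ++ PySem.Int.toStr c else "")) :: pvAltEntries rest
  termination_by l => l.length
  decreasing_by
    simp only [List.length_cons, List.length_unattach]
    calc (List.filter (fun x => !(x.1 == h)) t.attach).length
        ≤ t.attach.length := List.length_filter_le _ _
      _ = t.length := List.length_attach
      _ < t.length + 1 := Nat.lt_succ_self _

def format_listing_labels_py_alt (labels : List String) : String :=
  PySem.Str.join "; " (pvAltEntries labels)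

-- ===== PRECONDITION & SPEC =====
def Spec_format_listing_labels_py (labels : List String) (out : String) : Prop := out = format_listing_labels_py_alt labels
instance (labels : List String) (out : String) : Decidable (Spec_format_listing_labels_py labels out) := by unfold Spec_format_listing_labels_py; infer_instance

-- ===== CLAIM (what is proved, stated in full; the proofs are below) =====
def Claim_equal_format_listing_labels_py : Prop := ∀ (labels : List String), Dom_format_listing_labels_py labels → Spec_format_listing_labels_py labels (format_listing_labels_py labels)

-- ===== LEMMAS AND PROOFS =====

-- the common normal form: entries for the distinct labels in first-occurrence order
def pvJoinForm (l : List String) : String :=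
  PySem.Str.join "; " ((PySem.Set.ofList l).map (fun k =>
    "[" ++ k ++ "]" ++ (if (l.count k : Int) > 1 then " x" ++ PySem.Int.toStr (l.count k) else "")))

theorem a_eq_joinForm (labels : List String) : format_listing_labels_py labels = pvJoinForm labels := by
  unfold format_listing_labels_py pvJoinForm
  simp only [PySem.Dict.foldl_insert_getD_add_one_eq_counter, PySem.Dict.items_counter,
    PySem.List.foldl_append_singleton_eq_map, List.map_map, List.nil_append]
  refine congrArg _ (List.map_congr_left ?_)
  intro k _
  simp only [Function.comp, gt_iff_lt, Nat.one_lt_cast]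
  split_ifs with h <;> simp only [← String.append_assoc, String.append_empty]

theorem countP_not_eq (l : List String) (p : String → Bool) :
    l.countP (fun x => !p x) = l.length - l.countP p := by
  induction l with
  | nil => simp
  | cons a t ih =>
    have hle := List.countP_le_length (p := p) (l := t)
    by_cases h : p a <;> simp [h, ih] <;> omega

theorem ofList_filter (p : String → Bool) (t : List String) :
    PySem.Set.ofList (t.filter p) = (PySem.Set.ofList t).filter p := by
  induction t with
  | nil => rfl
  | cons a t ih =>
    rw [List.filter_cons]
    by_cases h : p a
    · simp only [if_pos h, PySem.Set.ofList_cons, PySem.Set.discard, ih,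
        List.filter_cons_of_pos h, List.filter_filter]
      congr 1
      apply List.filter_congr
      intro x _
      exact Bool.and_comm _ _
    · rw [if_neg h, PySem.Set.ofList_cons, PySem.Set.discard,
        List.filter_cons_of_neg (by simp [h]), List.filter_filter, ih]
      apply List.filter_congr
      intro x _
      cases hp : p x
      · rfl
      · have hxa : (x == a) = false := by
          refine beq_eq_false_iff_ne.mpr ?_
          rintro rfl
          rw [hp] at h; exact h rfl
        rw [hxa]
        rfl

theorem entries_eq_aux : ∀ (n : Nat) (labels : List String), labels.length ≤ n →
    pvAltEntries labels = (PySem.Set.ofList labels).map (fun k =>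
      "[" ++ k ++ "]" ++ (if (labels.count k : Int) > 1 then " x" ++ PySem.Int.toStr (labels.count k) else "")) := by
  intro n
  induction n with
  | zero =>
    intro labels hlen
    have : labels = [] := List.eq_nil_of_length_eq_zero (Nat.le_zero.mp hlen)
    subst this
    rw [pvAltEntries]
    simp [PySem.Set.ofList_nil]
  | succ n ih =>
    intro labels hlen
    match labels with
    | [] =>
      rw [pvAltEntries]
      simp [PySem.Set.ofList_nil]
    | h :: t =>
      rw [pvAltEntries]
      set rest := t.filter (fun x => !(x == h)) with hrest
      set c : Int := (1 + (t.length : Int)) - (rest.length : Int) with hcdef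
      have hrest_n : rest.length ≤ n := by
        have hfl : rest.length ≤ t.length := List.length_filter_le _ _
        simp only [List.length_cons] at hlen
        omega
      have hrest_count : ∀ k, k ≠ h → rest.count k = t.count k := by
        intro k hk
        exact List.count_filter (by simp [hk])
      have hlenr : rest.length = t.length - t.count h := by
        rw [hrest, ← List.countP_eq_length_filter, List.count, List.countP_eq_length_filter,
          List.countP_eq_length_filter]
        have := countP_not_eq t (fun x => x == h)
        rw [List.countP_eq_length_filter, List.countP_eq_length_filter] at this
        exact this
      have hc : c = ((h :: t).count h : Int) := by
        have h1 : t.count h ≤ t.length := List.count_le_length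
        rw [hcdef, hlenr, List.count_cons_self]
        push_cast [Nat.cast_sub h1]
        ring
      have hof : PySem.Set.ofList (h :: t) = h :: PySem.Set.ofList rest := by
        rw [PySem.Set.ofList_cons, PySem.Set.discard, hrest, ofList_filter]
      rw [hof, List.map_cons, hc, ih rest hrest_n]
      congr 1
      refine List.map_congr_left ?_
      intro k hk
      have hkmem : k ∈ rest := (PySem.Set.mem_ofList rest k).mp hk
      have hkh : k ≠ h := by
        have := List.of_mem_filter hkmem
        simpa using this
      have hck : List.count k rest = List.count k (h :: t) := by
        rw [hrest_count k hkh]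
        simp [Ne.symm hkh]
      rw [hck]

theorem b_eq_joinForm (labels : List String) : format_listing_labels_py_alt labels = pvJoinForm labels := by
  unfold format_listing_labels_py_alt pvJoinForm
  rw [entries_eq_aux labels.length labels (Nat.le_refl _)]

-- ===== VERDICT (by name: the statement is the Claim_ definition above) =====
theorem format_listing_labels_py_spec : Claim_equal_format_listing_labels_py := by
  intro labels _
  unfold Spec_format_listing_labels_py
  rw [a_eq_joinForm, b_eq_joinForm]
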